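-- pv_equiv track=rewrite | github.com/hitcslj/leetcode | Problem/interview/huawei/T1_binary_search.py | solve
-- ===== SOURCE A (Python) =====
-- def solve(nums, target):
--     nums.sort()
--     left, right = 0, len(nums) - 1
--     path = ['S']
--     d = 0
--     while left <= right:
--         mid = (left+right)//2
--         d += 1
--         if nums[mid] == target:
--             return path + ['Y']
--         elif nums[mid] < target:
--             # if len(nums) < (1<<d):break
--             path.append('R')
--             left = mid + 1
--         else:
--             # if len(nums) < (1<<d):break
--             path.append('L')
--             right = mid - 1
--     return path + ['N']
-- ===== SOURCE B (Python) =====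
-- def solve(nums, target):
--     nums.sort()
--
--     def go(sub):
--         if not sub:
--             return ['N']
--         m = (len(sub) - 1) // 2
--         if sub[m] == target:
--             return ['Y']
--         if sub[m] < target:
--             return ['R'] + go(sub[m+1:])
--         return ['L'] + go(sub[:m])
--
--     return ['S'] + go(nums)
-- ===== Notes on version B (the rewrite author's own statement) =====
-- stated objective: alternative
-- what changed: Replaced A's left/right index-pointer while-loop with an appended path accumulator by a recursion on physical slices of the sorted list (go(sub) searches sub, recursing into sub[m+1:] or sub[:m]), building the move list front-to-back by consing.
import Mathlib
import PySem

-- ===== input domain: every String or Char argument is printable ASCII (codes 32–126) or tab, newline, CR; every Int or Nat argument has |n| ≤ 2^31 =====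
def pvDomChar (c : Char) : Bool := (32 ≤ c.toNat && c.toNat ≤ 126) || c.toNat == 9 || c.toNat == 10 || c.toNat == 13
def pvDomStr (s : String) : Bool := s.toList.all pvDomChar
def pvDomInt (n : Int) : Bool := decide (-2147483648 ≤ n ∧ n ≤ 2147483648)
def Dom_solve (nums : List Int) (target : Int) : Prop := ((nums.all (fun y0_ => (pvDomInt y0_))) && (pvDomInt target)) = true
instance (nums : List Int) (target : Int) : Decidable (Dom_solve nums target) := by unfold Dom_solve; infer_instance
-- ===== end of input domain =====

-- B replaces A's left/right index pointers and appended-path accumulator by a structural recursion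
-- on the sorted list itself (searching physical slices); same return value, no speed claim.
-- Both A and B sort nums in place; the equivalence proved here is about the return value.

-- ===== PORT A =====
-- A's while-loop, state (left, right, path); the Nat fuel (length+1 at the call, never exhausted: the
-- range shrinks every iteration) only makes the loop structurally recursive; nums[mid] via pyGet?
-- (indices stay in range from solve, the none branch is unreachable).
def solveLoop (ns : List Int) (t : Int) : Nat → Int → Int → List String → List String
  | 0, _, _, path => path ++ ["N"]
  | fuel + 1, l, r, path =>
    if l ≤ r then
      match PySem.List.pyGet? ns (PySem.Int.floordiv (l + r) 2) with
      | none => path ++ ["N"]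
      | some v =>
        if v = t then path ++ ["Y"]
        else if v < t then solveLoop ns t fuel (PySem.Int.floordiv (l + r) 2 + 1) r (path ++ ["R"])
        else solveLoop ns t fuel l (PySem.Int.floordiv (l + r) 2 - 1) (path ++ ["L"])
    else path ++ ["N"]

def solve (nums : List Int) (target : Int) : List String :=
  let ns := PySem.List.sorted nums (fun x => x) false
  solveLoop ns target (ns.length + 1) 0 ((ns.length : Int) - 1)  ["S"]

-- ===== PORT B =====
-- B's go(sub): recursion on the slice; sub[m] with 0 ≤ m < len(sub) is exactly getD m 0 (in range),
-- sub[m+1:] is drop (m+1), sub[:m] is take m. Terminates because the slice shrinks.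
def solveGo (t : Int) (sub : List Int) : List String :=
  if h : sub.isEmpty then ["N"]
  else
    let m := (sub.length - 1) / 2
    if sub.getD m 0 = t then ["Y"]
    else if sub.getD m 0 < t then "R" :: solveGo t (sub.drop (m + 1))
    else "L" :: solveGo t (sub.take m)
termination_by sub.length
decreasing_by
  all_goals
    (have hp : 0 < sub.length := List.length_pos_iff_ne_nil.mpr (by simpa [List.isEmpty_iff] using h)
     simp; omega)

def solve_alt (nums : List Int) (target : Int) : List String :=
  let ns := PySem.List.sorted nums (fun x => x) false
  "S" :: solveGo target ns

-- ===== PRECONDITION & SPEC =====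
def Spec_solve (nums : List Int) (target : Int) (out : List String) : Prop := out = solve_alt nums target
instance (nums : List Int) (target : Int) (out : List String) : Decidable (Spec_solve nums target out) := by unfold Spec_solve; infer_instance

-- ===== CLAIM (what is proved, stated in full; the proofs are below) =====
def Claim_equal_solve : Prop := ∀ (nums : List Int) (target : Int), Dom_solve nums target → Spec_solve nums target (solve nums target)

-- ===== LEMMAS AND PROOFS =====
-- Invariant: A's loop on the index window [a, a+b) of ns computes path ++ B's recursion on the slice
-- (ns.drop a).take b.
theorem solveLoop_eq_go (ns : List Int) (t : Int) :
    ∀ (fuel a b : Nat) (path : List String), b ≤ fuel → a + b ≤ ns.length →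
      solveLoop ns t fuel (a : Int) ((a : Int) + (b : Int) - 1) path
        = path ++ solveGo t ((ns.drop a).take b) := by
  intro fuel
  induction fuel with
  | zero =>
    intro a b path hb _
    interval_cases b
    simp [solveLoop, solveGo]
  | succ n ih =>
    intro a b path hb hab
    match b with
    | 0 =>
      simp [solveLoop, solveGo]
    | k + 1 =>
      have hlen : ((ns.drop a).take (k+1)).length = k + 1 := by
        rw [List.length_take, List.length_drop]; omega
      have hne : ¬ ((ns.drop a).take (k+1)).isEmpty := by
        have hnil : ((ns.drop a).take (k+1)) ≠ [] := by
          intro hnil; rw [hnil] at hlen; simp at hlen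
        simpa [List.isEmpty_iff] using hnil
      set m := k / 2 with hm
      have hmid : (a : Int) + ((a : Int) + (k+1 : Nat) - 1) = ((2*a + k : Nat) : Int) := by
        push_cast; ring
      have hfd : PySem.Int.floordiv ((a : Int) + ((a : Int) + (k+1 : Nat) - 1)) 2
          = ((a + m : Nat) : Int) := by
        rw [hmid]
        rw [show ((2:Int)) = ((2:Nat):Int) from rfl, PySem.Int.floordiv_natCast]
        congr 1
        omega
      have hidx : a + m < ns.length := by omega
      have hget : PySem.List.pyGet? ns ((a + m : Nat) : Int) = some (ns.getD (a+m) 0) := by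
        rw [PySem.List.pyGet?_natCast, List.getElem?_eq_getElem hidx,
           List.getD_eq_getElem?_getD, List.getElem?_eq_getElem hidx]
        rfl
      have hsub : ((ns.drop a).take (k+1)).getD m 0 = ns.getD (a+m) 0 := by
        have hm' : m < k + 1 := by omega
        rw [List.getD_eq_getElem?_getD, List.getD_eq_getElem?_getD,
            List.getElem?_take_of_lt hm', List.getElem?_drop,
            List.getElem?_eq_getElem hidx]
      have hmgo : (((ns.drop a).take (k+1)).length - 1) / 2 = m := by
        rw [hlen]; omega
      simp only [solveLoop, show ((a:Int)) ≤ (a:Int) + ((k+1 : Nat):Int) - 1 by push_cast; omega,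
        if_true, hfd, hget]
      conv_rhs => rw [solveGo]
      simp only [dif_neg hne, hmgo, hsub]
      by_cases hvt : ns[a+m]?.getD 0 = t
      · simp [hvt]
      · by_cases hlt : ns.getD (a+m) 0 < t
        · -- go right: window [a+m+1, a+k+1), slice drop (m+1)
          have hdrop : ((ns.drop a).take (k+1)).drop (m+1)
              = (ns.drop (a+m+1)).take (k - m) := by
            rw [List.drop_take, List.drop_drop]
            congr 1
            omega
          have hrec := ih (a+m+1) (k-m) (path ++ ["R"]) (by omega) (by omega)
          simp only [hlt, if_true]
          rw [show ((a + m : Nat) : Int) + 1 = ((a+m+1 : Nat) : Int) by push_cast; ring,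
              show ((a:Int)) + ((k+1 : Nat):Int) - 1 = ((a+m+1 : Nat):Int) + ((k-m : Nat):Int) - 1 by push_cast; omega]
          rw [hrec, hdrop]
          simp [hvt]
        · -- go left: window [a, a+m), slice take m
          have htake : ((ns.drop a).take (k+1)).take m = (ns.drop a).take m := by
            rw [List.take_take]; congr 1; omega
          have hrec := ih a m (path ++ ["L"]) (by omega) (by omega)
          simp only [hlt, if_false]
          rw [show ((a + m : Nat) : Int) - 1 = ((a:Int)) + ((m : Nat):Int) - 1 by push_cast; ring]
          rw [hrec, htake]
          simp [hvt]

-- ===== VERDICT (by name: the statement is the Claim_ definition above) =====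
theorem solve_spec : Claim_equal_solve := by
  intro nums target _
  unfold Spec_solve solve solve_alt
  have h := solveLoop_eq_go (PySem.List.sorted nums (fun x => x) false) target
      ((PySem.List.sorted nums (fun x => x) false).length + 1) 0
      (PySem.List.sorted nums (fun x => x) false).length ["S"] (by omega) (by omega)
  rw [List.drop_zero, List.take_length] at h
  simpa using h
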